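-- pv_equiv track=rewrite | github.com/rafaelxiao/athena | analyst/price_deviation.py | __categorize_with_groups__
-- ===== SOURCE A (Python) =====
-- def __categorize_with_groups__(list, cate_list):
--     def generate_cate_dict(cate_list, raw_list):
--         output_dict = {}
--         for i in range(len(cate_list)):
--             if len(cate_list) == 1:
--                 output_dict['below %s' % str(cate_list[i])] = raw_list[0]
--                 output_dict['above %s' % str(cate_list[i])] = raw_list[-1]
--             if i == 0:
--                 output_dict['below %s'%str(cate_list[i])] = raw_list[0]
--             elif i == len(cate_list) - 1:
--                 output_dict['%s to %s' %(str(cate_list[i - 1]), str(cate_list[i]))] = raw_list[-2]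
--                 output_dict['above %s'%str(cate_list[i])] = raw_list[-1]
--             else:
--                 output_dict['%s to %s'%(str(cate_list[i-1]), str(cate_list[i]))] = raw_list[i]
--         return output_dict
--
--     cate_list.sort()
--
--     raw_list = [[] for i in range(len(cate_list) + 1)]
--     for i in list:
--         for j in range(len(cate_list)):
--             if i > cate_list[-1]:
--                 raw_list[-1].append(i)
--                 break
--             elif i < cate_list[j]:
--                 raw_list[j].append(i)
--                 break
--             else:
--                 continue
--
--     output_dict = generate_cate_dict(cate_list, raw_list)
--     return output_dict
-- ===== SOURCE B (Python) =====
-- def __categorize_with_groups__(list, cate_list):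
--     # Note: like the original, this sorts cate_list in place.
--     cate_list.sort()
--     n = len(cate_list)
--     buckets = [[] for _ in range(n + 1)]
--     for x in list:
--         # binary search: lo becomes the first index j with x < cate_list[j] (bisect_right)
--         lo, hi = 0, n
--         while lo < hi:
--             mid = (lo + hi) // 2
--             if x < cate_list[mid]:
--                 hi = mid
--             else:
--                 lo = mid + 1
--         if lo < n:
--             buckets[lo].append(x)
--         elif n and x > cate_list[-1]:
--             buckets[n].append(x)
--         # a value equal to the top boundary fits no strict category and is dropped, as in the original
--     out = {}
--     if n == 1:
--         out['below %s' % cate_list[0]] = buckets[0]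
--         out['above %s' % cate_list[0]] = buckets[1]
--     elif n >= 2:
--         out['below %s' % cate_list[0]] = buckets[0]
--         for j in range(1, n):
--             out['%s to %s' % (cate_list[j - 1], cate_list[j])] = buckets[j]
--         out['above %s' % cate_list[-1]] = buckets[n]
--     return out
-- ===== Notes on version B (the rewrite author's own statement) =====
-- stated objective: faster
-- what changed: Replaces A's per-item linear scan over the sorted boundaries (plus a positional generate_cate_dict loop) with a hand-written bisect_right binary search per item and a direct below/middles/above dict build.
import Mathlib
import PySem

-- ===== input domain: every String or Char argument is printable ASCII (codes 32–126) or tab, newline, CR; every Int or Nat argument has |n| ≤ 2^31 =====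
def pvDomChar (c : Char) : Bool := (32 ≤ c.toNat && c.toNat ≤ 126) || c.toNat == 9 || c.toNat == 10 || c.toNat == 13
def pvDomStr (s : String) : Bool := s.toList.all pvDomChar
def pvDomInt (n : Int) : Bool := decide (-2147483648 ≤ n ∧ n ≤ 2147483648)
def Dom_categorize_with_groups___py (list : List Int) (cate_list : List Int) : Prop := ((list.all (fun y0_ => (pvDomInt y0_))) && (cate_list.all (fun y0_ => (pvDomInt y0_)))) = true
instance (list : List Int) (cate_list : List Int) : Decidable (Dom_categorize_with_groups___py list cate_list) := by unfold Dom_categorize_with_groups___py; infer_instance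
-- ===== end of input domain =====

-- B replaces A's per-item linear scan over the sorted boundaries by a binary search (bisect_right)
-- and builds the output dict directly as below/middles/above. Both A and B sort cate_list in place
-- (same side effect); the equivalence proved here is about the return value.

-- ===== PORT A =====
-- A's inner 'for j in range(len(cate_list))' loop, scanning the j's in order; returns the bucket index
-- to append to (cs.length stands for raw_list[-1], raw_list having length cs.length+1); none = no break fired
def pvScanA (cs : List Int) (x : Int) : List Nat → Option Nat
  | [] => none
  | j :: js =>
    if PySem.List.pyGetD cs (-1) 0 < x then some cs.length   -- 'if i > cate_list[-1]' (cs nonempty whenever the body runs)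
    else if x < PySem.List.pyGetD cs (j : Int) 0 then some j
    else pvScanA cs x js

-- the 'for i in list: for j in range(len(cate_list)): …' filling loop of A
def pvRawA (cs : List Int) (l : List Int) : List (List Int) :=
  l.foldl (fun raw x =>
    match pvScanA cs x (List.range cs.length) with
    | some j => raw.set j (raw.getD j [] ++ [x])             -- raw_list[j].append(i) / raw_list[-1].append(i)
    | none => raw) (List.replicate (cs.length + 1) [])

-- 'generate_cate_dict(cate_list, raw_list)': a dict built by a loop over range(len(cate_list));
-- all indexing via pyGetD (every access is in range since raw has length len(cate_list)+1 at the call site)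
def pvGenCateDict (cs : List Int) (raw : List (List Int)) : PySem.Dict String (List Int) :=
  (((List.range cs.length).map (fun i : Nat => (i : Int))).foldl (fun d i =>
    let d := if cs.length = 1 then
        (d.insert ("below " ++ PySem.Int.toStr (PySem.List.pyGetD cs i 0)) (PySem.List.pyGetD raw 0 [])).insert
          ("above " ++ PySem.Int.toStr (PySem.List.pyGetD cs i 0)) (PySem.List.pyGetD raw (-1) [])
      else d
    if i = 0 then
      d.insert ("below " ++ PySem.Int.toStr (PySem.List.pyGetD cs i 0)) (PySem.List.pyGetD raw 0 [])
    else if i = (cs.length : Int) - 1 then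
      (d.insert (PySem.Int.toStr (PySem.List.pyGetD cs (i - 1) 0) ++ " to " ++ PySem.Int.toStr (PySem.List.pyGetD cs i 0)) (PySem.List.pyGetD raw (-2) [])).insert
        ("above " ++ PySem.Int.toStr (PySem.List.pyGetD cs i 0)) (PySem.List.pyGetD raw (-1) [])
    else
      d.insert (PySem.Int.toStr (PySem.List.pyGetD cs (i - 1) 0) ++ " to " ++ PySem.Int.toStr (PySem.List.pyGetD cs i 0)) (PySem.List.pyGetD raw i []))
    PySem.Dict.empty)

def categorize_with_groups___py (list : List Int) (cate_list : List Int) : List (String × List Int) :=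
  -- cate_list.sort() (in-place; the return value is computed from the sorted list)
  (pvGenCateDict (PySem.List.sorted cate_list (fun x => x))
    (pvRawA (PySem.List.sorted cate_list (fun x => x)) list)).items

-- ===== PORT B =====
-- the hand-written 'while lo < hi' bisect_right loop of Source B
def pvBisect (cs : List Int) (x : Int) (lo hi : Nat) : Nat :=
  if lo < hi then
    let mid := (lo + hi) / 2
    if x < PySem.List.pyGetD cs (mid : Int) 0 then pvBisect cs x lo mid
    else pvBisect cs x (mid + 1) hi
  else lo
termination_by hi - lo
decreasing_by all_goals omega

-- Source B's single bucket-filling loop over list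
def pvBucketsB (cs : List Int) (l : List Int) : List (List Int) :=
  l.foldl (fun bks x =>
    let lo := pvBisect cs x 0 cs.length
    if lo < cs.length then bks.set lo (bks.getD lo [] ++ [x])
    else if 0 < cs.length ∧ PySem.List.pyGetD cs (-1) 0 < x then bks.set cs.length (bks.getD cs.length [] ++ [x])
    else bks) (List.replicate (cs.length + 1) [])

-- Source B's direct below/middles/above construction of the output dict
def pvOutB (cs : List Int) (bks : List (List Int)) : PySem.Dict String (List Int) :=
  if cs.length = 1 then
    (PySem.Dict.empty.insert ("below " ++ PySem.Int.toStr (PySem.List.pyGetD cs 0 0)) (PySem.List.pyGetD bks 0 [])).insert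
      ("above " ++ PySem.Int.toStr (PySem.List.pyGetD cs 0 0)) (PySem.List.pyGetD bks 1 [])
  else if 2 ≤ cs.length then
    ((PySem.List.pyRange 1 (cs.length : Int)).foldl
      (fun d j => d.insert (PySem.Int.toStr (PySem.List.pyGetD cs (j - 1) 0) ++ " to " ++ PySem.Int.toStr (PySem.List.pyGetD cs j 0)) (PySem.List.pyGetD bks j []))
      (PySem.Dict.empty.insert ("below " ++ PySem.Int.toStr (PySem.List.pyGetD cs 0 0)) (PySem.List.pyGetD bks 0 []))).insert
      ("above " ++ PySem.Int.toStr (PySem.List.pyGetD cs (-1) 0)) (PySem.List.pyGetD bks (cs.length : Int) [])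
  else PySem.Dict.empty

def categorize_with_groups___py_alt (list : List Int) (cate_list : List Int) : List (String × List Int) :=
  -- cate_list.sort() (in-place, as in A; the return value is computed from the sorted list)
  (pvOutB (PySem.List.sorted cate_list (fun x => x))
    (pvBucketsB (PySem.List.sorted cate_list (fun x => x)) list)).items

-- ===== PRECONDITION & SPEC =====
def Spec_categorize_with_groups___py (list : List Int) (cate_list : List Int) (out : List (String × List Int)) : Prop := out = categorize_with_groups___py_alt list cate_list
instance (list : List Int) (cate_list : List Int) (out : List (String × List Int)) : Decidable (Spec_categorize_with_groups___py list cate_list out) := by unfold Spec_categorize_with_groups___py; infer_instance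

-- ===== CLAIM (what is proved, stated in full; the proofs are below) =====
def Claim_equal_categorize_with_groups___py : Prop := ∀ (list : List Int) (cate_list : List Int), Dom_categorize_with_groups___py list cate_list → Spec_categorize_with_groups___py list cate_list (categorize_with_groups___py list cate_list)

-- ===== LEMMAS AND PROOFS =====

theorem pv_findIdx_char {α : Type} (p : α → Bool) (cs : List α) : ∀ (r : Nat), r ≤ cs.length →
    (∀ k (h : k < cs.length), k < r → p cs[k] = false) →
    (∀ h : r < cs.length, p cs[r] = true) → cs.findIdx p = r := by
  induction cs with
  | nil => intro r hr _ _; simpa using (Nat.le_antisymm (by simpa using hr) (Nat.zero_le r)).symm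
  | cons c t ih =>
    intro r hr hb ha
    cases r with
    | zero =>
      have := ha (by simp)
      simp only [List.getElem_cons_zero] at this
      simp [List.findIdx_cons, this]
    | succ r =>
      have h0 : p c = false := hb 0 (by simp) (by omega)
      simp only [List.findIdx_cons, h0, cond_false]
      have := ih r (by simpa using hr)
        (fun k h hk => by simpa using hb (k+1) (by simpa) (by omega))
        (fun h => by simpa using ha (by simpa))
      omega

theorem pv_pyGetD_negk {α : Type} (xs : List α) (k : Nat) (d : α) (h1 : 0 < k) (h2 : k ≤ xs.length) :
    PySem.List.pyGetD xs (-(k : Int)) d = xs.getD (xs.length - k) d := by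
  have hlt : xs.length - k < xs.length := by omega
  simp only [PySem.List.pyGetD, PySem.List.pyGet?, PySem.List.pyIdx?]
  rw [if_neg (by omega), if_pos (by omega)]
  simp only [Option.bind_some, neg_neg, Int.toNat_natCast]
  rw [List.getElem?_eq_getElem hlt, List.getD_eq_getElem _ _ hlt]
  rfl

theorem pv_bisect_eq (cs : List Int) (x : Int)
    (hmono : ∀ i j : Nat, (hij : i ≤ j) → (hj : j < cs.length) → cs[i]'(by omega) ≤ cs[j]) :
    ∀ (d lo hi : Nat), hi - lo ≤ d → lo ≤ hi → hi ≤ cs.length →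
    (∀ k (h : k < cs.length), k < lo → ¬ x < cs[k]) →
    (∀ k (h : k < cs.length), hi ≤ k → x < cs[k]) →
    pvBisect cs x lo hi = cs.findIdx (fun c => decide (x < c)) := by
  intro d
  induction d with
  | zero =>
    intro lo hi hd hlh hhn hlo hhi
    have he : hi = lo := by omega
    subst he
    rw [pvBisect, if_neg (by omega)]
    exact (pv_findIdx_char _ cs hi hhn
      (fun k h hk => by simpa using hlo k h hk)
      (fun h => by simpa using hhi hi h le_rfl)).symm
  | succ d ih =>
    intro lo hi hd hlh hhn hlo hhi
    rw [pvBisect]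
    by_cases h : lo < hi
    · rw [if_pos h]
      have hmidlt : (lo + hi) / 2 < cs.length := by omega
      have hmg : PySem.List.pyGetD cs (((lo + hi) / 2 : Nat) : Int) 0 = cs[(lo + hi) / 2] := by
        rw [PySem.List.pyGetD_natCast, List.getD_eq_getElem _ _ hmidlt]
      by_cases hx : x < PySem.List.pyGetD cs (((lo + hi) / 2 : Nat) : Int) 0
      · simp only [hx, if_pos]
        refine ih lo ((lo + hi) / 2) (by omega) (by omega) (by omega) hlo ?_
        intro k hk hmk
        by_cases hkhi : hi ≤ k
        · exact hhi k hk hkhi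
        · calc x < cs[(lo + hi) / 2] := by rwa [hmg] at hx
            _ ≤ cs[k] := hmono _ k hmk hk
      · simp only [hx, if_false]
        refine ih ((lo + hi) / 2 + 1) hi (by omega) (by omega) hhn ?_ hhi
        intro k hk hkm
        have hle : cs[k] ≤ cs[(lo + hi) / 2] := hmono k _ (by omega) hmidlt
        rw [hmg] at hx
        omega
    · rw [if_neg h]
      have he : hi = lo := by omega
      subst he
      exact (pv_findIdx_char _ cs hi hhn
        (fun k hh hk => by simpa using hlo k hh (by omega))
        (fun hh => by simpa using hhi hi hh le_rfl)).symm

theorem pv_scanA_suffix (cs : List Int) (x : Int)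
    (hlast : ¬ PySem.List.pyGetD cs (-1) 0 < x) :
    ∀ (d j : Nat), cs.length - j = d → j ≤ cs.length → (∀ k (h : k < cs.length), k < j → ¬ x < cs[k]) →
      pvScanA cs x (List.range' j d) =
        (if cs.findIdx (fun c => decide (x < c)) < cs.length then some (cs.findIdx (fun c => decide (x < c))) else none) := by
  intro d
  induction d with
  | zero =>
    intro j hd hj hb
    have hF : cs.findIdx (fun c => decide (x < c)) = cs.length :=
      pv_findIdx_char _ cs cs.length le_rfl (fun k h hk => by simpa using hb k h (by omega)) (fun h => absurd h (by omega))
    simp [pvScanA, hF]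
  | succ d ih =>
    intro j hd hj hb
    have hjlt : j < cs.length := by omega
    have hjg : PySem.List.pyGetD cs ((j : Nat) : Int) 0 = cs[j] := by
      rw [PySem.List.pyGetD_natCast, List.getD_eq_getElem _ _ hjlt]
    rw [List.range'_succ]
    show (if PySem.List.pyGetD cs (-1) 0 < x then some cs.length
      else if x < PySem.List.pyGetD cs (j : Int) 0 then some j else pvScanA cs x (List.range' (j+1) d)) = _
    rw [if_neg hlast]
    by_cases hx : x < PySem.List.pyGetD cs (j : Int) 0
    · rw [if_pos hx]
      have hF : cs.findIdx (fun c => decide (x < c)) = j :=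
        pv_findIdx_char _ cs j (by omega) (fun k h hk => by simpa using hb k h hk)
          (fun h => by simp only [decide_eq_true_eq]; rwa [hjg] at hx)
      rw [hF, if_pos hjlt]
    · rw [if_neg hx]
      refine ih (j+1) (by omega) (by omega) ?_
      intro k hk hkj
      rcases Nat.lt_succ_iff_lt_or_eq.mp hkj with h' | h'
      · exact hb k hk h'
      · subst h'; rwa [hjg] at hx

theorem pv_scanA_above (cs : List Int) (x : Int) (hn : 0 < cs.length)
    (hx : PySem.List.pyGetD cs (-1) 0 < x) :
    pvScanA cs x (List.range cs.length) = some cs.length := by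
  obtain ⟨m, hm⟩ : ∃ m, cs.length = m + 1 := ⟨cs.length - 1, by omega⟩
  rw [hm, List.range_succ_eq_map]
  show (if PySem.List.pyGetD cs (-1) 0 < x then some cs.length else _) = _
  rw [if_pos hx, hm]

theorem pv_raw_eq (cs : List Int) (l : List Int)
    (hmono : ∀ i j : Nat, (hij : i ≤ j) → (hj : j < cs.length) → cs[i]'(by omega) ≤ cs[j]) :
    pvRawA cs l = pvBucketsB cs l := by
  unfold pvRawA pvBucketsB
  refine PySem.List.foldl_congr_mem l _ _ _ ?_
  intro raw x _
  have hbis : pvBisect cs x 0 cs.length = cs.findIdx (fun c => decide (x < c)) :=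
    pv_bisect_eq cs x hmono cs.length 0 cs.length (by omega) (by omega) le_rfl
      (fun k h hk => absurd hk (by omega)) (fun k h hk => absurd h (by omega))
  by_cases hn : cs.length = 0
  · have hcs : cs = [] := List.length_eq_zero_iff.mp hn
    subst hcs
    simp [pvScanA, pvBisect]
  · have hnpos : 0 < cs.length := by omega
    have hlastg : PySem.List.pyGetD cs (-1) 0 = cs[cs.length - 1]'(by omega) := by
      rw [show (-1 : Int) = -((1 : Nat) : Int) by simp, pv_pyGetD_negk cs 1 0 (by omega) (by omega),
        List.getD_eq_getElem _ _ (by omega)]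
    dsimp only
    rw [hbis]
    by_cases hab : PySem.List.pyGetD cs (-1) 0 < x
    · rw [pv_scanA_above cs x hnpos hab]
      have hF : cs.findIdx (fun c => decide (x < c)) = cs.length :=
        pv_findIdx_char _ cs cs.length le_rfl
          (fun k h hk => by
            simp only [decide_eq_false_iff_not, not_lt]
            have h1 : cs[cs.length - 1]'(by omega) ≤ x := by rw [hlastg] at hab; omega
            have h2 : cs[k] ≤ cs[cs.length - 1]'(by omega) := hmono k (cs.length - 1) (by omega) (by omega)
            omega)
          (fun h => absurd h (by omega))
      rw [hF, if_neg (by omega), if_pos ⟨hnpos, hab⟩]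
    · rw [List.range_eq_range',
        pv_scanA_suffix cs x hab cs.length 0 rfl (by omega) (fun k h hk => absurd hk (by omega))]
      by_cases hF : cs.findIdx (fun c => decide (x < c)) < cs.length
      · rw [if_pos hF, if_pos hF]
      · rw [if_neg hF, if_neg hF, if_neg (fun hc => hab hc.2)]

theorem pv_buckets_len (cs : List Int) (l : List Int) : (pvBucketsB cs l).length = cs.length + 1 := by
  unfold pvBucketsB
  suffices h : ∀ (t : List Int) (raw : List (List Int)),
      (t.foldl (fun bks x =>
        let lo := pvBisect cs x 0 cs.length
        if lo < cs.length then bks.set lo (bks.getD lo [] ++ [x])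
        else if 0 < cs.length ∧ PySem.List.pyGetD cs (-1) 0 < x then bks.set cs.length (bks.getD cs.length [] ++ [x])
        else bks) raw).length = raw.length by
    rw [h]; simp
  intro t
  induction t with
  | nil => intro raw; rfl
  | cons y t ih =>
    intro raw
    rw [List.foldl_cons, ih]
    dsimp only
    split_ifs <;> simp

theorem pv_key_ne (t : String) : ("above " ++ t) ≠ ("below " ++ t) := by
  intro h
  have := congrArg String.toList h
  simp [String.toList_append] at this

theorem pv_reinsert {ν : Type} (kb ka : String) (v w : ν) (hne : ka ≠ kb) :
    ((PySem.Dict.empty.insert kb v).insert ka w).insert kb v = (PySem.Dict.empty.insert kb v).insert ka w := by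
  simp [PySem.Dict.insert, PySem.Dict.contains, PySem.Dict.empty, hne, Ne.symm hne]

theorem pv_pyRange_ofNat (m : Nat) :
    PySem.List.pyRange 1 ((1 + m : Nat) : Int) = (List.range' 1 m).map (fun i : Nat => (i : Int)) := by
  induction m with
  | zero => rfl
  | succ m ih =>
    have h1 : ((1 + (m + 1) : Nat) : Int) = ((1 + m : Nat) : Int) + 1 := by push_cast; ring
    rw [h1, PySem.List.pyRange_one_succ_right (by push_cast; omega), ih, List.range'_concat, List.map_append]
    simp




theorem pv_dict_eq (cs : List Int) (raw : List (List Int)) (hraw : raw.length = cs.length + 1) :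
    pvGenCateDict cs raw = pvOutB cs raw := by
  by_cases h0 : cs.length = 0
  · unfold pvGenCateDict pvOutB
    simp [h0]
  by_cases h1 : cs.length = 1
  · unfold pvGenCateDict pvOutB
    have hm1 : PySem.List.pyGetD raw (-1) [] = raw.getD 1 [] := by
      rw [show (-1 : Int) = -((1 : Nat) : Int) by simp, pv_pyGetD_negk raw 1 [] (by omega) (by omega), hraw, h1]
    have hp1 : PySem.List.pyGetD raw (1 : Int) [] = raw.getD 1 [] := by
      rw [show (1 : Int) = ((1 : Nat) : Int) by simp, PySem.List.pyGetD_natCast]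
    obtain ⟨c, hc⟩ : ∃ c, cs = [c] := by
      match cs, h1 with | [c], _ => exact ⟨c, rfl⟩
    subst hc
    simp only [List.length_singleton] at hraw
    simp [hm1, hp1]
    exact pv_reinsert _ _ _ _ (pv_key_ne _)
  · have h2 : 2 ≤ cs.length := by omega
    have hm2 : PySem.List.pyGetD raw (-2) [] = raw.getD (cs.length - 1) [] := by
      rw [show (-2 : Int) = -((2 : Nat) : Int) by simp, pv_pyGetD_negk raw 2 [] (by omega) (by omega), hraw,
        show cs.length + 1 - 2 = cs.length - 1 by omega]
    have hm1 : PySem.List.pyGetD raw (-1) [] = raw.getD cs.length [] := by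
      rw [show (-1 : Int) = -((1 : Nat) : Int) by simp, pv_pyGetD_negk raw 1 [] (by omega) (by omega), hraw,
        show cs.length + 1 - 1 = cs.length by omega]
    have hrn : PySem.List.pyGetD raw ((cs.length : Nat) : Int) [] = raw.getD cs.length [] :=
      PySem.List.pyGetD_natCast raw cs.length []
    have hrn1 : PySem.List.pyGetD raw (((cs.length - 1 : Nat) : Nat) : Int) [] = raw.getD (cs.length - 1) [] :=
      PySem.List.pyGetD_natCast raw (cs.length - 1) []
    have hc1 : PySem.List.pyGetD cs (-1) 0 = cs.getD (cs.length - 1) 0 := by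
      rw [show (-1 : Int) = -((1 : Nat) : Int) by simp, pv_pyGetD_negk cs 1 0 (by omega) (by omega)]
    have hcn1 : PySem.List.pyGetD cs (((cs.length - 1 : Nat) : Nat) : Int) 0 = cs.getD (cs.length - 1) 0 :=
      PySem.List.pyGetD_natCast cs (cs.length - 1) 0
    have hsplit : List.range' 1 (cs.length - 1) = List.range' 1 (cs.length - 2) ++ [cs.length - 1] := by
      have e2 : cs.length - 1 = (cs.length - 2) + 1 := by omega
      have e3 : 1 + 1 * (cs.length - 2) = cs.length - 1 := by omega
      conv_lhs => rw [e2]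
      rw [List.range'_concat, e3]
    have hrange : List.range cs.length = 0 :: (List.range' 1 (cs.length - 2) ++ [cs.length - 1]) := by
      rw [List.range_eq_range']
      have e1 : cs.length = (cs.length - 1) + 1 := by omega
      conv_lhs => rw [e1]
      rw [List.range'_succ, ← hsplit]
    have hpyr : PySem.List.pyRange 1 (cs.length : Int) =
        (List.range' 1 (cs.length - 2)).map (fun i : Nat => (i : Int)) ++ [((cs.length - 1 : Nat) : Int)] := by
      rw [show ((cs.length : Nat) : Int) = ((1 + (cs.length - 1) : Nat) : Int) by rw [show (1 + (cs.length - 1) : Nat) = cs.length by omega],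
        pv_pyRange_ofNat, hsplit, List.map_append]
      rfl
    have e4 : ((cs.length - 1 : Nat) : Int) = (cs.length : Int) - 1 := by omega
    unfold pvGenCateDict pvOutB
    rw [hrange, if_neg h1, if_pos h2, hpyr]
    simp only [List.map_cons, List.map_append, List.foldl_cons,
      List.foldl_append, List.foldl_nil, List.foldl_map]
    have hne1 : ¬((cs.length : Int) - 1 = 0) := by omega
    simp only [if_neg h1, e4, Nat.cast_zero, hne1, if_false, if_true, hm2, hm1, hrn, hc1]
    rw [show PySem.List.pyGetD raw ((cs.length : Int) - 1) [] = raw.getD (cs.length - 1) [] from by rw [← e4, hrn1],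
      show PySem.List.pyGetD cs ((cs.length : Int) - 1) 0 = cs.getD (cs.length - 1) 0 from by rw [← e4, hcn1]]
    congr 1
    congr 1
    refine PySem.List.foldl_congr_mem _ _ _ _ ?_
    intro acc y hy
    obtain ⟨hy1, hy2⟩ := List.mem_range'_1.mp hy
    rw [if_neg (by omega), if_neg (by omega)]

-- ===== VERDICT (by name: the statement is the Claim_ definition above) =====
theorem categorize_with_groups___py_spec : Claim_equal_categorize_with_groups___py := by
  intro l c _
  unfold Spec_categorize_with_groups___py categorize_with_groups___py categorize_with_groups___py_alt
  have hmono : ∀ i j : Nat, (hij : i ≤ j) → (hj : j < (PySem.List.sorted c (fun x => x)).length) →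
      (PySem.List.sorted c (fun x => x))[i]'(by omega) ≤ (PySem.List.sorted c (fun x => x))[j] :=
    fun i j hij hj => PySem.List.sorted_id_getElem_mono c hij hj
  rw [pv_raw_eq _ _ hmono, pv_dict_eq _ _ (pv_buckets_len _ _)]
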